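-- pv_equiv track=rewrite | github.com/wulukewu/cp-code | 20240608 abc240d1.py | strange_balls
-- ===== SOURCE A (Python) =====
-- def strange_balls(N, a):
--     stack = []
--     result = []
--
--     for i in range(N):
--         ball = a[i]
--         if stack and stack[-1][0] == ball:
--             stack[-1][1] += 1
--         else:
--             stack.append([ball, 1])
--
--         if stack[-1][1] == ball:
--             stack.pop()
--
--         result.append(sum(count for _, count in stack))
--
--     return result
-- ===== SOURCE B (Python) =====
-- def strange_balls(N, a):
--     stack = []  # flat stack of individual ball values
--     result = []
--     for i in range(N):
--         ball = a[i]
--         stack.append(ball)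
--         if ball >= 1 and len(stack) >= ball and all(x == ball for x in stack[-ball:]):
--             del stack[-ball:]
--         result.append(len(stack))
--     return result
-- ===== Notes on version B (the rewrite author's own statement) =====
-- stated objective: alternative
-- what changed: B keeps the tube as a flat stack of individual ball values and pops the trailing run when the last `ball` entries all equal `ball`, so the per-step answer is just len(stack), removing A's [value,count] group stack and its per-step sum over all groups.
import Mathlib
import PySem

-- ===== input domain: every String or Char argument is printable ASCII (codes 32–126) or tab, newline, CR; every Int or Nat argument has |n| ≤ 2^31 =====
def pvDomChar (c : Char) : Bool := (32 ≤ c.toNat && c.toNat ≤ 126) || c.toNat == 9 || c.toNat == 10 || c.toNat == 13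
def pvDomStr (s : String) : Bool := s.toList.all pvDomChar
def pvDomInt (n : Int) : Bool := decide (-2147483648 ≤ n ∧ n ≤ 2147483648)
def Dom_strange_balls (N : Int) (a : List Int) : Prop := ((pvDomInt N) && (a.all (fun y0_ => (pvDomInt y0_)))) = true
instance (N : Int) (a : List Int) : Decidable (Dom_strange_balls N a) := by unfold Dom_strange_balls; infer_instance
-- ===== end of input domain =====

-- B replaces A's [value,count] group stack (with a per-step sum over all groups) by a flat
-- stack of individual balls, whose length is the per-step answer; objective: idiomatic.
-- Both stacks keep the TOP at the HEAD of the Lean list (Python appends/pops at the end).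

-- ===== PORT A =====
-- A's loop body after reading `ball`: merge-or-push, then conditional pop
def sbAfterA (b : Int) (g : List (Int × Int)) : List (Int × Int) :=
  -- if stack and stack[-1][0] == ball: stack[-1][1] += 1 else: stack.append([ball, 1])
  let stack :=
    match g with
    | (v, c) :: rest => if v = b then (v, c + 1) :: rest else (b, 1) :: (v, c) :: rest
    | [] => [(b, 1)]
  -- if stack[-1][1] == ball: stack.pop()
  match stack with
  | (v, c) :: rest => if c = b then rest else (v, c) :: rest
  | [] => []

-- one iteration of A's loop; state = (group stack, result list)
def sbStepA (a : List Int) (st : List (Int × Int) × List Int) (i : Int) : List (Int × Int) × List Int :=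
  let ball := PySem.List.pyGetD a i 0
  let stack := sbAfterA ball st.1
  -- result.append(sum(count for _, count in stack))
  (stack, st.2 ++ [stack.foldl (fun s p => s + p.2) 0])

def strange_balls (N : Int) (a : List Int) : List Int :=
  ((PySem.List.pyRange 0 N 1).foldl (sbStepA a) ([], [])).2

-- ===== PORT B =====
-- B's loop body after reading `ball`: append, then pop the trailing run if it is full
def sbAfterB (b : Int) (f : List Int) : List Int :=
  -- stack.append(ball)
  let stack := b :: f
  -- if ball >= 1 and len(stack) >= ball and all(x == ball for x in stack[-ball:]): del stack[-ball:]
  if 1 ≤ b ∧ b ≤ (stack.length : Int) ∧ ∀ x ∈ stack.take b.toNat, x = b then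
    stack.drop b.toNat
  else stack

-- one iteration of B's loop; state = (flat stack, result list)
def sbStepB (a : List Int) (st : List Int × List Int) (i : Int) : List Int × List Int :=
  let ball := PySem.List.pyGetD a i 0
  let stack := sbAfterB ball st.1
  -- result.append(len(stack))
  (stack, st.2 ++ [(stack.length : Int)])

def strange_balls_alt (N : Int) (a : List Int) : List Int :=
  ((PySem.List.pyRange 0 N 1).foldl (sbStepB a) ([], [])).2

-- ===== PRECONDITION & SPEC =====
-- A raises IndexError (a[i]) exactly when the loop reaches an index ≥ len(a); Pre_ excludes those inputs.
def Pre_strange_balls (N : Int) (a : List Int) : Prop := N ≤ (a.length : Int)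
instance (N : Int) (a : List Int) : Decidable (Pre_strange_balls N a) := by unfold Pre_strange_balls; infer_instance
def pvWitness_strange_balls : Int × List Int := (5, [3, 1, 2, 2, 3])

def Spec_strange_balls (N : Int) (a : List Int) (out : List Int) : Prop := out = strange_balls_alt N a
instance (N : Int) (a : List Int) (out : List Int) : Decidable (Spec_strange_balls N a out) := by unfold Spec_strange_balls; infer_instance

-- ===== CLAIM (what is proved, stated in full; the proofs are below) =====
def Claim_equal_strange_balls : Prop := ∀ (N : Int) (a : List Int), Dom_strange_balls N a → Pre_strange_balls N a → Spec_strange_balls N a (strange_balls N a)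

-- ===== LEMMAS AND PROOFS =====

-- the flat stack corresponding to a group stack
def sbExpand (g : List (Int × Int)) : List Int := g.flatMap (fun p => List.replicate p.2.toNat p.1)

lemma sbExpand_cons (v c : Int) (rest : List (Int × Int)) :
    sbExpand ((v, c) :: rest) = List.replicate c.toNat v ++ sbExpand rest := by
  simp [sbExpand]

-- adjacent groups have distinct values
def sbAdj : List (Int × Int) → Prop
  | p :: q :: r => p.1 ≠ q.1 ∧ sbAdj (q :: r)
  | _ => True

-- invariant of A's group stack: adjacent groups have distinct values, every count is ≥ 1,
-- and a group of value v ≥ 1 has count < v (it is popped the instant its count reaches v)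
def sbWF (g : List (Int × Int)) : Prop :=
  sbAdj g ∧ ∀ p ∈ g, 1 ≤ p.2 ∧ (1 ≤ p.1 → p.2 < p.1)

lemma sbAdj_tail (p : Int × Int) (t : List (Int × Int)) (h : sbAdj (p :: t)) : sbAdj t := by
  cases t with
  | nil => trivial
  | cons q r => exact h.2

lemma sbSum (g : List (Int × Int)) (h : ∀ p ∈ g, 0 ≤ p.2) :
    ∀ s : Int, g.foldl (fun s p => s + p.2) s = s + ((sbExpand g).length : Int) := by
  induction g with
  | nil => intro s; simp [sbExpand]
  | cons p t ih =>
      intro s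
      have hp : 0 ≤ p.2 := h p (by simp)
      have ht := ih (fun q hq => h q (by simp [hq])) (s + p.2)
      simp only [List.foldl_cons, ht, sbExpand, List.flatMap_cons, List.length_append,
        List.length_replicate]
      push_cast
      omega

lemma sbMemTakeHead {α : Type} (x : α) (t : List α) (k : Nat) (hk : 1 ≤ k) :
    x ∈ (x :: t).take k := by
  obtain ⟨j, rfl⟩ : ∃ j, k = j + 1 := ⟨k - 1, by omega⟩
  simp [List.take_succ_cons]

-- core single-step simulation
lemma sbCore (b : Int) (g : List (Int × Int)) (hwf : sbWF g) :
    sbWF (sbAfterA b g) ∧ sbAfterB b (sbExpand g) = sbExpand (sbAfterA b g) := by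
  obtain ⟨hch, hall⟩ := hwf
  cases g with
  | nil =>
      by_cases hb : b = 1
      · subst hb
        refine ⟨⟨trivial, by simp [sbAfterA]⟩, ?_⟩
        norm_num [sbAfterA, sbAfterB, sbExpand]
      · have h1b : ¬ (1 : Int) = b := by omega
        have hA : sbAfterA b [] = [(b, 1)] := by simp [sbAfterA, h1b]
        have hB : sbAfterB b (sbExpand []) = [b] := by
          simp only [sbAfterB, sbExpand, List.flatMap_nil]
          rw [if_neg (by rintro ⟨h1, h2, _⟩; simp at h2; omega)]
        refine ⟨?_, by rw [hA, hB, sbExpand_cons]; simp [sbExpand]⟩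
        rw [hA]
        exact ⟨trivial, by intro p hp; simp at hp; subst hp; exact ⟨le_refl _, by omega⟩⟩
  | cons hd rest =>
      obtain ⟨v, c⟩ := hd
      have hc : 1 ≤ c := (hall (v, c) (List.mem_cons_self)).1
      have hcv : 1 ≤ v → c < v := (hall (v, c) (List.mem_cons_self)).2
      have hrest : ∀ p ∈ rest, 1 ≤ p.2 ∧ (1 ≤ p.1 → p.2 < p.1) :=
        fun p hp => hall p (List.mem_cons_of_mem _ hp)
      have hchr : sbAdj rest := sbAdj_tail _ _ hch
      by_cases hvb : v = b
      · subst hvb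
        have hrep : v :: (List.replicate c.toNat v ++ sbExpand rest)
            = List.replicate (c + 1).toNat v ++ sbExpand rest := by
          have hn : (c + 1).toNat = c.toNat + 1 := by omega
          rw [hn, List.replicate_succ, List.cons_append]
        by_cases hpop : c + 1 = v
        · -- the run is now full: A pops the top group, B drops the trailing run
          have hA : sbAfterA v ((v, c) :: rest) = rest := by simp [sbAfterA, hpop]
          have hlenrep : (List.replicate (c + 1).toNat v).length = v.toNat := by simp; omega
          have hB : sbAfterB v (sbExpand ((v, c) :: rest)) = sbExpand rest := by
            simp only [sbAfterB, sbExpand_cons, hrep]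
            rw [if_pos, ← hlenrep, List.drop_left]
            refine ⟨by omega, ?_, ?_⟩
            · rw [List.length_append, hlenrep]; push_cast; omega
            · rw [← hlenrep, List.take_left]
              intro x hx
              exact List.eq_of_mem_replicate hx
          refine ⟨?_, by rw [hA, hB]⟩
          rw [hA]; exact ⟨hchr, hrest⟩
        · -- run not full: A increments the count, B keeps the stack
          have hA : sbAfterA v ((v, c) :: rest) = (v, c + 1) :: rest := by
            simp [sbAfterA, hpop]
          have hB : sbAfterB v (sbExpand ((v, c) :: rest)) = v :: sbExpand ((v, c) :: rest) := by
            simp only [sbAfterB]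
            rw [if_neg]
            rintro ⟨h1, h2, h3⟩
            have hclt : c + 1 < v := by have := hcv h1; omega
            rw [sbExpand_cons, hrep] at h2 h3
            cases rest with
            | nil =>
                simp only [sbExpand, List.flatMap_nil, List.append_nil,
                  List.length_replicate] at h2
                omega
            | cons q r =>
                obtain ⟨w, d⟩ := q
                have hwv : v ≠ w := hch.1
                have hd : 1 ≤ d := (hrest (w, d) (List.mem_cons_self)).1
                obtain ⟨m, hm⟩ : ∃ m, d.toNat = m + 1 := ⟨d.toNat - 1, by omega⟩
                have hexp : sbExpand ((w, d) :: r)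
                    = w :: (List.replicate m w ++ sbExpand r) := by
                  rw [sbExpand_cons, hm, List.replicate_succ, List.cons_append]
                rw [hexp] at h3
                have hlt : (c + 1).toNat < v.toNat := by omega
                have htake : (List.replicate (c + 1).toNat v
                      ++ (w :: (List.replicate m w ++ sbExpand r))).take v.toNat
                    = List.replicate (c + 1).toNat v
                      ++ (w :: (List.replicate m w ++ sbExpand r)).take
                          (v.toNat - (c + 1).toNat) := by
                  rw [List.take_append, List.take_of_length_le (by simp; omega),
                    List.length_replicate]
                have hwmem : w ∈ (List.replicate (c + 1).toNat v
                    ++ (w :: (List.replicate m w ++ sbExpand r))).take v.toNat := by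
                  rw [htake]
                  exact List.mem_append_right _ (sbMemTakeHead w _ _ (by omega))
                exact hwv (h3 w hwmem).symm
          constructor
          · rw [hA]
            refine ⟨?_, ?_⟩
            · cases rest with
              | nil => trivial
              | cons q r => exact ⟨hch.1, hchr⟩
            · intro p hp
              rcases List.mem_cons.mp hp with h | h
              · subst h; exact ⟨by omega, fun h1 => by have := hcv h1; omega⟩
              · exact hrest p h
          · rw [hA, hB, sbExpand_cons, sbExpand_cons, hrep]
      · -- new color on top
        by_cases hb1 : b = 1
        · subst hb1
          have hA : sbAfterA 1 ((v, c) :: rest) = (v, c) :: rest := by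
            simp [sbAfterA, hvb]
          have hB : sbAfterB 1 (sbExpand ((v, c) :: rest)) = sbExpand ((v, c) :: rest) := by
            simp only [sbAfterB]
            rw [if_pos]
            · simp
            · refine ⟨le_refl _, by simp, by simp⟩
          refine ⟨?_, by rw [hA, hB]⟩
          rw [hA]; exact ⟨hch, hall⟩
        · have h1b : ¬ (1 : Int) = b := by omega
          have hA : sbAfterA b ((v, c) :: rest) = (b, 1) :: (v, c) :: rest := by
            simp [sbAfterA, hvb, h1b]
          have hB : sbAfterB b (sbExpand ((v, c) :: rest)) = b :: sbExpand ((v, c) :: rest) := by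
            simp only [sbAfterB]
            rw [if_neg]
            rintro ⟨h1, h2, h3⟩
            have hb2 : 2 ≤ b := by omega
            obtain ⟨m, hm⟩ : ∃ m, c.toNat = m + 1 := ⟨c.toNat - 1, by omega⟩
            have hexp : sbExpand ((v, c) :: rest)
                = v :: (List.replicate m v ++ sbExpand rest) := by
              rw [sbExpand_cons, hm, List.replicate_succ, List.cons_append]
            rw [hexp] at h3
            obtain ⟨j, hj⟩ : ∃ j, b.toNat = j + 1 := ⟨b.toNat - 1, by omega⟩
            have hvmem : v ∈ (b :: (v :: (List.replicate m v ++ sbExpand rest))).take b.toNat := by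
              rw [hj, List.take_succ_cons]
              exact List.mem_cons_of_mem _ (sbMemTakeHead v _ _ (by omega))
            exact hvb (h3 v hvmem)
          constructor
          · rw [hA]
            refine ⟨⟨fun h => hvb h.symm, hch⟩, ?_⟩
            intro p hp
            rcases List.mem_cons.mp hp with h | h
            · subst h; exact ⟨le_refl _, by omega⟩
            · exact hall p h
          · rw [hA, hB]
            simp [sbExpand]

lemma sbStep_sim (a : List Int) (i : Int) (g : List (Int × Int)) (f res : List Int)
    (hwf : sbWF g) (hf : f = sbExpand g) :
    sbWF ((sbStepA a (g, res) i).1) ∧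
      (sbStepB a (f, res) i).1 = sbExpand ((sbStepA a (g, res) i).1) ∧
      (sbStepA a (g, res) i).2 = (sbStepB a (f, res) i).2 := by
  subst hf
  obtain ⟨h1, h2⟩ := sbCore (PySem.List.pyGetD a i 0) g hwf
  refine ⟨h1, h2, ?_⟩
  simp only [sbStepA, sbStepB, h2]
  have := sbSum (sbAfterA (PySem.List.pyGetD a i 0) g) (fun p hp => by have := (h1.2 p hp).1; omega) 0
  rw [this]
  simp

lemma sbFold (a : List Int) (l : List Int) :
    ∀ (g : List (Int × Int)) (f res : List Int), sbWF g → f = sbExpand g →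
      (l.foldl (sbStepA a) (g, res)).2 = (l.foldl (sbStepB a) (f, res)).2 := by
  induction l with
  | nil => intro g f res hwf hf; rfl
  | cons i t ih =>
      intro g f res hwf hf
      obtain ⟨h1, h2, h3⟩ := sbStep_sim a i g f res hwf hf
      simp only [List.foldl_cons]
      have key := ih (sbStepA a (g, res) i).1 (sbStepB a (f, res) i).1 (sbStepA a (g, res) i).2 h1 h2
      simp only [Prod.mk.eta] at key
      rw [h3] at key
      simpa only [Prod.mk.eta] using key

-- ===== VERDICT (by name: the statement is the Claim_ definition above) =====
theorem strange_balls_spec : Claim_equal_strange_balls := by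
  intro N a _ _
  unfold Spec_strange_balls strange_balls strange_balls_alt
  exact sbFold a (PySem.List.pyRange 0 N 1) [] [] [] ⟨trivial, by simp⟩ (by simp [sbExpand])
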